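-- pv_equiv track=rewrite | github.com/comp110-24f/comp-110-workspace-aprilxchou | lessons/lists.py | odds_lists
-- ===== SOURCE A (Python) =====
-- def odds_lists(min: int, max: int) -> list[int]:
--     """Returns list of odds between min and max"""
--     odds: list[int] = list()
--     x: int = min
--     while x <= max:
--         if x % 2 == 1:
--             odds.append(x)
--         x += 1
--     return odds
-- ===== SOURCE B (Python) =====
-- def odds_lists(min: int, max: int) -> list[int]:
--     """Returns list of odds between min and max"""
--     first = min if min % 2 == 1 else min + 1
--     return list(range(first, max + 1, 2))
-- ===== Notes on version B (the rewrite author's own statement) =====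
-- stated objective: idiomatic
-- what changed: Replaces the scan of every integer in [min,max] with a parity test by computing the first odd >= min and building the list directly with a step-2 range.
import Mathlib
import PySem

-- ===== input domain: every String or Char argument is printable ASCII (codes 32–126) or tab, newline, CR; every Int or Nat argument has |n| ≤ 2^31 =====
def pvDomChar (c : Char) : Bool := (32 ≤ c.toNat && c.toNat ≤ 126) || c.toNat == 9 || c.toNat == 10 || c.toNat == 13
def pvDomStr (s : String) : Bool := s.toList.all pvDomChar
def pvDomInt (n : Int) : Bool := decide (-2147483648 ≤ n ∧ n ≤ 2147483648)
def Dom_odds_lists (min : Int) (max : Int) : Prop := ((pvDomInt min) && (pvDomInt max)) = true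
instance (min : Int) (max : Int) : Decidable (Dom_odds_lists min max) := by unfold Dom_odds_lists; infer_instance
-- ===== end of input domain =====

-- B replaces A's scan-every-integer-with-a-parity-test loop by a direct step-2 range from the first odd ≥ min (idiomatic).


-- ===== PORT A =====
-- while x <= max: if x % 2 == 1: odds.append(x); x += 1   (Lean Int % is emod = Python % for divisor 2)
def oddsGoA (mx : Int) (x : Int) (acc : List Int) : List Int :=
  if _h : x ≤ mx then
    oddsGoA mx (x + 1) (if x % 2 = 1 then acc ++ [x] else acc)
  else acc
termination_by (mx + 1 - x).toNat
decreasing_by omega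

def odds_lists (min : Int) (max : Int) : List Int :=
  oddsGoA max min []

-- ===== PORT B =====
def odds_lists_alt (min : Int) (max : Int) : List Int :=
  let first := if min % 2 = 1 then min else min + 1
  PySem.List.pyRange first (max + 1) 2

-- ===== PRECONDITION & SPEC =====
def Spec_odds_lists (min : Int) (max : Int) (out : List Int) : Prop := out = odds_lists_alt min max
instance (min : Int) (max : Int) (out : List Int) : Decidable (Spec_odds_lists min max out) := by unfold Spec_odds_lists; infer_instance

-- ===== CLAIM (what is proved, stated in full; the proofs are below) =====
def Claim_equal_odds_lists : Prop := ∀ (min : Int) (max : Int), Dom_odds_lists min max → Spec_odds_lists min max (odds_lists min max)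

-- ===== LEMMAS AND PROOFS =====

theorem pyRange_two_eq_nil {a b : Int} (h : b ≤ a) : PySem.List.pyRange a b 2 = [] := by
  rw [PySem.List.pyRange_of_pos a b (by norm_num)]
  simp [show ¬ a < b by omega]

theorem pyRange_two_cons {a b : Int} (h : a < b) :
    PySem.List.pyRange a b 2 = a :: PySem.List.pyRange (a + 2) b 2 := by
  rw [PySem.List.pyRange_of_pos a b (by norm_num),
      PySem.List.pyRange_of_pos (a + 2) b (by norm_num)]
  have hc : (if a < b then ((b - a + 2 - 1) / 2).toNat else 0)
      = (if a + 2 < b then ((b - (a + 2) + 2 - 1) / 2).toNat else 0) + 1 := by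
    by_cases h2 : a + 2 < b
    · simp only [if_pos h, if_pos h2]
      omega
    · simp only [if_pos h, if_neg h2]
      omega
  rw [hc, List.range_succ_eq_map, List.map_cons, List.map_map]
  refine congrArg₂ _ (by ring) (List.map_congr_left ?_)
  intro k _
  simp only [Function.comp]
  push_cast
  ring

theorem oddsGoA_eq (mx : Int) (x : Int) (acc : List Int) :
    oddsGoA mx x acc = acc ++ PySem.List.pyRange (if x % 2 = 1 then x else x + 1) (mx + 1) 2 := by
  rw [oddsGoA]
  by_cases h : x ≤ mx
  · rw [dif_pos h, oddsGoA_eq mx (x + 1)]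
    have hmod : x % 2 = 0 ∨ x % 2 = 1 := by omega
    rcases hmod with h0 | h1
    · have h1' : (x + 1) % 2 = 1 := by omega
      simp only [if_neg (by omega : ¬ x % 2 = 1), if_pos h1']
    · have h2 : ¬ (x + 1) % 2 = 1 := by omega
      simp only [if_pos h1, if_neg h2]
      rw [pyRange_two_cons (by omega : x < mx + 1)]
      rw [show x + 1 + 1 = x + 2 by ring]
      simp
  · rw [dif_neg h]
    have : PySem.List.pyRange (if x % 2 = 1 then x else x + 1) (mx + 1) 2 = [] := by
      apply pyRange_two_eq_nil; split <;> omega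
    simp [this]
termination_by (mx + 1 - x).toNat
decreasing_by omega

-- ===== VERDICT (by name: the statement is the Claim_ definition above) =====
theorem odds_lists_spec : Claim_equal_odds_lists := by
  intro mn mx _
  unfold Spec_odds_lists odds_lists odds_lists_alt
  rw [oddsGoA_eq]
  simp
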